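-- pv_equiv track=rewrite | github.com/KathyBarabash/asg-runtime | asg_runtime/gin/common/util.py | get_fstring_kwords
-- ===== SOURCE A (Python) =====
-- def get_fstring_kwords(string: str) -> list[str]:
--     """
--     Get keywords to an f-string.
--
--     Args:
--         string (str): f-string with keyword slots.
--
--     Returns:
--         list: Keywords to f-string.
--     """
--     kwords = []
--     # Split on instances of right brace, drop anything before the brace.
--     for substr in string.split("{")[1:]:
--         if "}" not in substr:
--             continue
--         kw = substr.split("}", 1)[0]
--         if kw != "":
--             kwords.append(kw)
--     return kwords
-- ===== SOURCE B (Python) =====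
-- def get_fstring_kwords(string: str) -> list[str]:
--     """One-pass state machine: collect chars after '{' until '}', emit non-empty buffers."""
--     kwords = []
--     buf = None  # None = not inside a '{...' fragment; str = keyword collected so far
--     for ch in string:
--         if ch == "{":
--             buf = ""
--         elif ch == "}":
--             if buf:
--                 kwords.append(buf)
--             buf = None
--         elif buf is not None:
--             buf += ch
--     return kwords
-- ===== Notes on version B (the rewrite author's own statement) =====
-- stated objective: alternative
-- what changed: Replaced split-on-'{' plus per-piece split-on-'}' scanning with a single left-to-right character state machine that buffers between a '{' and the next '}' and emits non-empty buffers; no split calls or intermediate piece lists.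
import Mathlib
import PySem

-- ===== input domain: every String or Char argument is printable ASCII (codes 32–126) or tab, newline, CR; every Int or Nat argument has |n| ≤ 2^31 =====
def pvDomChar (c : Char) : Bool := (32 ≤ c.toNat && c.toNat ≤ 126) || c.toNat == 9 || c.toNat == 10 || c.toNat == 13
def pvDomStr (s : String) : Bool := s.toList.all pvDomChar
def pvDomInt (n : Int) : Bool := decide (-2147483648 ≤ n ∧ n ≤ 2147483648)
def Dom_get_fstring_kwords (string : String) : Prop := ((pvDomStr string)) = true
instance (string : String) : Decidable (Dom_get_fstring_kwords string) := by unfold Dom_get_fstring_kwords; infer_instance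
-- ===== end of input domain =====

-- B replaces A's split-on-'{' / split-on-'}' piece scanning by a single character-by-character
-- state machine (alternative decomposition, same O(n) cost); return values agree on all inputs.

-- ===== PORT A =====
-- literal port of A: split on "{", drop the first piece, per piece take text before the first "}"
def get_fstring_kwords (string : String) : List String :=
  let pieces := (PySem.Str.split? string "{").getD []  -- sep "{" is non-empty, so split? never fails
  (PySem.List.slice pieces (some 1) none).foldl
    (fun kwords substr =>
      if PySem.Str.isIn "}" substr = false then kwords  -- 'if "}" not in substr: continue'
      else
        let kw := ((PySem.Str.splitMax? substr "}" 1).getD []).headD ""  -- substr.split("}", 1)[0]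
        if kw ≠ "" then kwords ++ [kw] else kwords)
    []

-- ===== PORT B =====
-- step of Source B's loop; state = (kwords so far, buffer: none = outside a '{' fragment,
-- some b = keyword chars collected so far, kept as List Char; exact transcription of Source B)
def kwStep (st : List String × Option (List Char)) (ch : Char) : List String × Option (List Char) :=
  if ch = '{' then (st.1, some [])
  else if ch = '}' then
    (match st.2 with
     | some b => if b = [] then st.1 else st.1 ++ [String.ofList b]  -- 'if buf: kwords.append(buf)'
     | none => st.1,
     none)
  else
    match st.2 with
    | some b => (st.1, some (b ++ [ch]))
    | none => st

def get_fstring_kwords_alt (string : String) : List String :=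
  (string.toList.foldl kwStep ([], none)).1

-- ===== PRECONDITION & SPEC =====
def Spec_get_fstring_kwords (string : String) (out : List String) : Prop := out = get_fstring_kwords_alt string
instance (string : String) (out : List String) : Decidable (Spec_get_fstring_kwords string out) := by unfold Spec_get_fstring_kwords; infer_instance

-- ===== CLAIM (what is proved, stated in full; the proofs are below) =====
def Claim_equal_get_fstring_kwords : Prop := ∀ (string : String), Dom_get_fstring_kwords string → Spec_get_fstring_kwords string (get_fstring_kwords string)

-- ===== LEMMAS AND PROOFS =====

def specGo : List Char → Option (List Char) → List String
  | [], _ => []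
  | c :: rest, b =>
    if c = '{' then specGo rest (some [])
    else
      match b with
      | none => specGo rest none
      | some bb =>
        if c = '}' then
          (if bb = [] then specGo rest none else String.ofList bb :: specGo rest none)
        else specGo rest (some (bb ++ [c]))

def splitBrace : List Char → List (List Char)
  | [] => [[]]
  | c :: rest => if c = '{' then [] :: splitBrace rest else (splitBrace rest).modifyHead (c :: ·)

def fC (acc : List String) (p : List Char) : List String :=
  if '}' ∉ p then acc
  else
    let kw := p.takeWhile (· ≠ '}')
    if kw = [] then acc else acc ++ [String.ofList kw]

theorem splitBrace_ne_nil (cs : List Char) : splitBrace cs ≠ [] := by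
  cases cs with
  | nil => simp [splitBrace]
  | cons c rest =>
    simp only [splitBrace]
    split_ifs
    · simp
    · cases h : splitBrace rest with
      | nil => exact absurd h (splitBrace_ne_nil rest)
      | cons a t => simp [List.modifyHead]

theorem splitOn_go_spec (fuel : Nat) :
    ∀ (l cur : List Char) (acc : List (List Char)), l.length ≤ fuel →
      PySem.Chars.splitOn.go ['{'] fuel l cur acc
        = acc.reverse ++ (splitBrace l).modifyHead (cur.reverse ++ ·) := by
  induction fuel with
  | zero =>
    intro l cur acc h
    have hl : l = [] := by cases l <;> simp_all
    subst hl
    simp [PySem.Chars.splitOn.go, splitBrace, List.modifyHead]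
  | succ fuel ih =>
    intro l cur acc h
    cases l with
    | nil => simp [PySem.Chars.splitOn.go, splitBrace, List.modifyHead]
    | cons c rest =>
      rw [PySem.Chars.splitOn.go]
      by_cases hc : c = '{'
      · subst hc
        have hp : (['{'] : List Char).isPrefixOf ('{' :: rest) = true := by
          simp [List.isPrefixOf]
        simp only [hp, if_pos, List.length_singleton, List.drop_one, List.tail_cons]
        rw [ih rest [] _ (by simpa using h)]
        simp [splitBrace, List.modifyHead]
        cases splitBrace rest <;> rfl
      · have hp : (['{'] : List Char).isPrefixOf (c :: rest) = false := by
          simp [List.isPrefixOf]; exact fun h' => absurd h'.symm hc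
        simp only [hp, Bool.false_eq_true, if_neg, not_false_iff]
        rw [ih rest (c :: cur) _ (by simpa using h)]
        cases hs : splitBrace rest with
        | nil => exact absurd hs (splitBrace_ne_nil rest)
        | cons a t => simp [splitBrace, hc, hs, List.modifyHead]

theorem splitOn_eq_splitBrace (cs : List Char) :
    PySem.Chars.splitOn cs ['{'] = splitBrace cs := by
  unfold PySem.Chars.splitOn
  rw [splitOn_go_spec (cs.length + 1) cs [] [] (by omega)]
  cases hs : splitBrace cs with
  | nil => exact absurd hs (splitBrace_ne_nil cs)
  | cons a t => simp [List.modifyHead]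

theorem splitOnMax_go_append (fuel : Nat) :
    ∀ (m : Nat) (l cur : List Char) (acc : List (List Char)),
      PySem.Chars.splitOnMax.go ['}'] fuel m l cur acc
        = acc.reverse ++ PySem.Chars.splitOnMax.go ['}'] fuel m l cur [] := by
  induction fuel with
  | zero => intro m l cur acc; simp [PySem.Chars.splitOnMax.go]
  | succ fuel ih =>
    intro m l cur acc
    cases l with
    | nil => simp [PySem.Chars.splitOnMax.go]
    | cons c rest =>
      rw [PySem.Chars.splitOnMax.go, PySem.Chars.splitOnMax.go]
      by_cases hm : m = 0
      · simp [hm]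
      · simp only [hm, if_neg, not_false_iff]
        split_ifs with hp
        · rw [ih (m-1) _ [] (cur.reverse :: acc), ih (m-1) _ [] [cur.reverse]]
          simp
        · exact ih m rest (c :: cur) acc

theorem splitOnMax_go_head (fuel : Nat) :
    ∀ (l cur : List Char), l.length ≤ fuel →
      (PySem.Chars.splitOnMax.go ['}'] fuel 1 l cur []).headD []
        = cur.reverse ++ l.takeWhile (· ≠ '}') := by
  induction fuel with
  | zero =>
    intro l cur h
    have hl : l = [] := by cases l <;> simp_all
    subst hl
    simp [PySem.Chars.splitOnMax.go]
  | succ fuel ih =>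
    intro l cur h
    cases l with
    | nil => simp [PySem.Chars.splitOnMax.go]
    | cons c rest =>
      rw [PySem.Chars.splitOnMax.go]
      by_cases hc : c = '}'
      · subst hc
        have hp : (['}'] : List Char).isPrefixOf ('}' :: rest) = true := by
          simp [List.isPrefixOf]
        simp only [hp, if_pos, one_ne_zero, if_neg, not_false_iff]
        rw [splitOnMax_go_append fuel 0 _ [] [cur.reverse]]
        simp [List.takeWhile]
      · have hp : (['}'] : List Char).isPrefixOf (c :: rest) = false := by
          simp [List.isPrefixOf]; exact fun h' => absurd h'.symm hc
        simp only [hp, Bool.false_eq_true, if_neg, not_false_iff, one_ne_zero]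
        rw [ih rest (c :: cur) (by simpa using h)]
        simp [List.takeWhile, hc]

theorem takeWhile_no_brace (b a : List Char) (hb : '}' ∉ b) :
    (b ++ '}' :: a).takeWhile (· ≠ '}') = b := by
  induction b with
  | nil => simp
  | cons x xs ih =>
    rw [List.mem_cons, not_or] at hb
    have hx : x ≠ '}' := fun h => hb.1 h.symm
    simp only [List.cons_append, List.takeWhile_cons, decide_not, hx, decide_eq_true_eq]
    rw [if_pos (by simp [hx])]
    have := ih hb.2
    simp only [decide_not] at this
    rw [this]

theorem splitMax_head (p : List Char) :
    ((PySem.Str.splitMax? (String.ofList p) "}" 1).getD []).headD ""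
      = String.ofList (p.takeWhile (· ≠ '}')) := by
  have hmap := PySem.Str.splitMax?_map (String.ofList p) "}" 1
  rw [show ("}" : String).toList = ['}'] from rfl, String.toList_ofList] at hmap
  have hch : PySem.Chars.splitMax? p ['}'] 1 = some (PySem.Chars.splitOnMax p ['}'] 1) := by
    simp [PySem.Chars.splitMax?]
  rw [hch] at hmap
  cases hx : PySem.Str.splitMax? (String.ofList p) "}" 1 with
  | none => rw [hx] at hmap; simp at hmap
  | some ys =>
    rw [hx] at hmap
    simp only [Option.map_some, Option.some.injEq] at hmap
    have hgo : PySem.Chars.splitOnMax p ['}'] 1 =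
        PySem.Chars.splitOnMax.go ['}'] (p.length + 1) 1 p [] [] := by
      simp [PySem.Chars.splitOnMax]
    have hhead : (PySem.Chars.splitOnMax p ['}'] 1).headD [] = p.takeWhile (· ≠ '}') := by
      rw [hgo, splitOnMax_go_head (p.length + 1) p [] (by omega)]; simp
    rw [← hmap] at hhead
    simp only [Option.getD_some]
    cases ys with
    | nil =>
      simp only [List.map_nil, List.headD_nil] at hhead
      simp only [List.headD_nil]
      rw [← hhead]
    | cons y t =>
      simp only [List.map_cons, List.headD_cons] at hhead
      simp only [List.headD_cons]
      rw [← hhead, String.ofList_toList]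

theorem A_fold_spec (cs : List Char) :
    (∀ acc, List.foldl fC acc ((splitBrace cs).drop 1) = acc ++ specGo cs none) ∧
    (∀ acc b, '}' ∉ b →
      List.foldl fC acc ((b ++ (splitBrace cs).headD []) :: (splitBrace cs).drop 1)
        = acc ++ specGo cs (some b)) := by
  induction cs with
  | nil =>
    constructor
    · intro acc; simp [splitBrace, specGo]
    · intro acc b hb; simp [splitBrace, specGo, fC, hb]
  | cons c rest ih =>
    obtain ⟨ih1, ih2⟩ := ih
    cases hs : splitBrace rest with
    | nil => exact absurd hs (splitBrace_ne_nil rest)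
    | cons a t =>
      by_cases hc : c = '{'
      · subst hc
        have hcons : splitBrace ('{' :: rest) = [] :: a :: t := by simp [splitBrace, hs]
        constructor
        · intro acc
          have := ih2 acc [] (by simp)
          simp only [hs] at this
          simpa [hcons, specGo] using this
        · intro acc b hb
          have := ih2 acc [] (by simp)
          simp only [hs] at this
          simp only [hcons, List.headD, List.drop_one, List.tail_cons, List.append_nil,
            List.foldl_cons]
          have hfc : fC acc b = acc := by simp [fC, hb]
          rw [hfc]
          simpa [specGo] using this
      · have hcons : splitBrace (c :: rest) = (c :: a) :: t := by
          simp [splitBrace, hc, hs, List.modifyHead]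
        constructor
        · intro acc
          have := ih1 acc
          simp only [hs] at this
          simpa [hcons, specGo, hc] using this
        · intro acc b hb
          by_cases hcb : c = '}'
          · subst hcb
            simp only [hcons, List.headD, List.drop_one, List.tail_cons, List.foldl_cons]
            have hfc : fC acc (b ++ '}' :: a) =
                if b = [] then acc else acc ++ [String.ofList b] := by
              unfold fC
              rw [if_neg (by simp), takeWhile_no_brace b a hb]
            rw [hfc]
            by_cases hbe : b = []
            · have := ih1 acc
              simp only [hs] at this
              simpa [specGo, hc, hbe] using this
            · have := ih1 (acc ++ [String.ofList b])
              simp only [hs] at this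
              simp only [List.drop_one, List.tail_cons] at this
              simp [specGo, hc, hbe, this]
          · have := ih2 acc (b ++ [c]) (by simp [hb]; exact fun h => hcb h.symm)
            simp only [hs] at this
            simp only [hcons, List.headD, List.drop_one, List.tail_cons] at this ⊢
            simpa [specGo, hc, hcb] using this

theorem portA_eq_fold (string : String) :
    get_fstring_kwords string = List.foldl fC [] ((splitBrace string.toList).drop 1) := by
  unfold get_fstring_kwords
  have hmap := PySem.Str.split?_map string "{"
  rw [show ("{" : String).toList = ['{'] from rfl] at hmap
  have hch : PySem.Chars.split? string.toList ['{'] = some (splitBrace string.toList) := by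
    simp [PySem.Chars.split?, splitOn_eq_splitBrace]
  rw [hch] at hmap
  cases hx : PySem.Str.split? string "{" with
  | none => rw [hx] at hmap; simp at hmap
  | some xs =>
    rw [hx] at hmap
    simp only [Option.map_some, Option.some.injEq] at hmap
    have hxs : xs = (splitBrace string.toList).map String.ofList := by
      rw [← hmap, List.map_map]
      simp [Function.comp_def, String.ofList_toList]
    simp only [Option.getD_some, hxs]
    rw [PySem.List.slice_from _ (by norm_num : (0:Int) ≤ 1)]
    rw [show ((1:Int).toNat) = 1 from rfl, ← List.map_drop, List.foldl_map]
    have hfun : (fun (kwords : List String) (p : List Char) =>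
        if PySem.Str.isIn "}" (String.ofList p) = false then kwords
        else
          let kw := ((PySem.Str.splitMax? (String.ofList p) "}" 1).getD []).headD ""
          if kw ≠ "" then kwords ++ [kw] else kwords) = fC := by
      funext acc p
      by_cases hm : '}' ∈ p
      · have hin : PySem.Str.isIn "}" (String.ofList p) = true := by
          rw [PySem.Str.isIn_iff_infix]
          simpa [List.singleton_infix_iff] using hm
        simp only [hin, Bool.true_eq_false, if_neg, not_false_iff, splitMax_head]
        unfold fC
        rw [if_neg (not_not_intro hm)]
        have hiff : (String.ofList (p.takeWhile (· ≠ '}')) = "") ↔ p.takeWhile (· ≠ '}') = [] := by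
          constructor
          · intro h; have := congrArg String.toList h; simpa using this
          · intro h; rw [h]
        by_cases hk : p.takeWhile (· ≠ '}') = []
        · rw [if_neg (not_not_intro (hiff.mpr hk)), if_pos hk]
        · rw [if_pos (fun h => hk (hiff.mp h)), if_neg hk]
      · have hin : PySem.Str.isIn "}" (String.ofList p) = false := by
          cases hb : PySem.Str.isIn "}" (String.ofList p) with
          | false => rfl
          | true =>
            rw [PySem.Str.isIn_iff_infix] at hb
            simp [List.singleton_infix_iff] at hb
            exact absurd (by simpa using hb) hm
        have hm' : '}' ∉ p := hm
        simp only [hin, if_pos]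
        unfold fC
        rw [if_pos hm']
    rw [hfun]

theorem portB_spec (cs : List Char) :
    ∀ (acc : List String) (b : Option (List Char)),
      (cs.foldl kwStep (acc, b)).1 = acc ++ specGo cs b := by
  induction cs with
  | nil => intro acc b; simp [specGo]
  | cons c rest ih =>
    intro acc b
    simp only [List.foldl_cons, specGo, kwStep]
    by_cases h1 : c = '{'
    · simp [h1, ih]
    · by_cases h2 : c = '}'
      · cases b with
        | none => simp [h1, h2, ih]
        | some bb =>
          by_cases hb : bb = []
          · simp [h1, h2, hb, ih]
          · simp [h1, h2, hb, ih]
      · cases b with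
        | none => simp [h1, h2, ih]
        | some bb => simp [h1, h2, ih]

-- ===== VERDICT (by name: the statement is the Claim_ definition above) =====
theorem get_fstring_kwords_spec : Claim_equal_get_fstring_kwords := by
  intro s _
  unfold Spec_get_fstring_kwords get_fstring_kwords_alt
  rw [portA_eq_fold, portB_spec s.toList [] none, (A_fold_spec s.toList).1]
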